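-- pv_equiv track=rewrite | github.com/Matsengg2031/payload | python_client/decoder.py | reverse_custom_cipher
-- ===== SOURCE A (Python) =====
-- def reverse_custom_cipher(hex_data, seed):
--     """Reverses the custom shift cipher."""
--     # 1. Hex to String
--     # (Using raw bytes simpler, but keeping string for consistency with JS demo)
--     bytes_data = bytes.fromhex(hex_data)
--     data = bytes_data.decode('latin1') # usage of latin1 preserves byte values 0-255
--
--     # Calculate shift
--     shift = 0
--     for char in seed:
--         shift += ord(char)
--     shift = shift % 128
--
--     result = []
--     for char in data:
--         code = ord(char)
--         # Reverse shift: (code - shift) mod 256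
--         # Python's % handles negative numbers correctly for this (e.g. -5 % 256 = 251)
--         new_code = (code - shift) % 256
--         result.append(chr(new_code))
--
--     return "".join(result)
-- ===== SOURCE B (Python) =====
-- def reverse_custom_cipher(hex_data, seed):
--     """Reverses the custom shift cipher via a precomputed 256-entry translation table."""
--     shift = sum(ord(c) for c in seed) % 128
--     table = bytes((i - shift) % 256 for i in range(256))
--     return bytes.fromhex(hex_data).translate(table).decode('latin1')
-- ===== Notes on version B (the rewrite author's own statement) =====
-- stated objective: idiomatic
-- what changed: Replaces the per-character decode/ord/chr/append loop with a precomputed 256-entry byte translation table applied to the decoded bytes in one bulk bytes.translate call.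
import Mathlib
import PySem

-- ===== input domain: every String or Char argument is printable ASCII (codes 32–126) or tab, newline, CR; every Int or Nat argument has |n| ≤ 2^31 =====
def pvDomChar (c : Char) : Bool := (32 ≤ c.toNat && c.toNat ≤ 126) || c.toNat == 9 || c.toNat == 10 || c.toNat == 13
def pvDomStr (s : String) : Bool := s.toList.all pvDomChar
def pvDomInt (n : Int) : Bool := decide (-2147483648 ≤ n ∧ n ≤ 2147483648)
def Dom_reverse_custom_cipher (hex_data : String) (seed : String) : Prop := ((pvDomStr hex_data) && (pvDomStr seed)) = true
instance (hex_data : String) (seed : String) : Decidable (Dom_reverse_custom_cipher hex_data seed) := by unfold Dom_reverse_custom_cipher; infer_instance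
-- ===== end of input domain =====

-- B replaces A's per-character decode/ord/chr/append loop with a precomputed 256-entry
-- translation table applied over the decoded bytes in one bulk pass (idiomatic rewrite).

-- Shared helper: Python's bytes.fromhex (CPython 3.11 rule: ASCII whitespace is skipped
-- between byte pairs, never inside a pair; none = ValueError). Both Pythons call this
-- same built-in, so both ports share this transliteration.
def pvHexVal? (c : Char) : Option Nat :=
  if 48 ≤ c.toNat ∧ c.toNat ≤ 57 then some (c.toNat - 48)
  else if 97 ≤ c.toNat ∧ c.toNat ≤ 102 then some (c.toNat - 87)
  else if 65 ≤ c.toNat ∧ c.toNat ≤ 70 then some (c.toNat - 55)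
  else none

def pvIsAsciiWs (c : Char) : Bool :=
  c.toNat == 32 || c.toNat == 9 || c.toNat == 10 || c.toNat == 13 || c.toNat == 11 || c.toNat == 12

def pvFromHex? : List Char → Option (List Nat)
  | [] => some []
  | c :: rest =>
    if pvIsAsciiWs c then pvFromHex? rest
    else
      match rest with
      | [] => none
      | c2 :: rest2 =>
        match pvHexVal? c, pvHexVal? c2 with
        | some h, some l => (pvFromHex? rest2).map (fun bs => (16 * h + l) :: bs)
        | _, _ => none

-- ===== PORT A =====
-- A: decode hex to bytes, read them as latin1 chars, sum ord(seed) in a loop,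
-- then loop over the data appending chr((code - shift) % 256) to a result list.
def reverse_custom_cipher (hex_data : String) (seed : String) : String :=
  match pvFromHex? hex_data.toList with
  | none => ""  -- unreachable under Pre_ (Python raises ValueError here)
  | some data =>
    let shift : Int := seed.toList.foldl (fun s c => s + (c.toNat : Int)) 0
    let shift : Int := PySem.Int.mod shift 128
    let result : List Char :=
      data.foldl (fun (acc : List Char) (code : Nat) =>
        acc ++ [Char.ofNat (PySem.Int.mod ((code : Int) - shift) 256).toNat]) []
    String.ofList result

-- ===== PORT B =====
-- B: shift = sum(map(ord, seed)) % 128; table[i] = (i - shift) % 256 for i in range(256);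
-- decode hex to bytes and translate each byte through the table in one bulk map.
def reverse_custom_cipher_alt (hex_data : String) (seed : String) : String :=
  let shift : Int := PySem.Int.mod ((seed.toList.map Char.toNat).sum : Nat) 128
  let table : List Nat :=
    (List.range 256).map (fun (i : Nat) => (PySem.Int.mod ((i : Int) - shift) 256).toNat)
  match pvFromHex? hex_data.toList with
  | none => ""  -- unreachable under Pre_ (Python raises ValueError here)
  | some bs => String.ofList (bs.map (fun b => Char.ofNat (table.getD b 0)))

-- ===== PRECONDITION & SPEC =====
-- closed-form char classifier: is c an ASCII hex digit?
def pvIsHexDigit (c : Char) : Bool :=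
  (48 ≤ c.toNat && c.toNat ≤ 57) || (97 ≤ c.toNat && c.toNat ≤ 102) || (65 ≤ c.toNat && c.toNat ≤ 70)

-- Pre_ holds exactly when hex_data is valid for bytes.fromhex (on the excluded inputs BOTH
-- Pythons raise ValueError; A returns nowhere else): every char is a hex digit or ASCII
-- whitespace, the number of hex digits is even, and whitespace only occurs on a byte
-- boundary (the count of preceding non-whitespace chars is even).
def pvValidHex (l : List Char) : Bool :=
  l.all (fun c => pvIsHexDigit c || pvIsAsciiWs c) &&
  (l.countP (fun c => !pvIsAsciiWs c)) % 2 == 0 &&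
  l.zipIdx.all (fun p => !pvIsAsciiWs p.1 || (l.take p.2).countP (fun c => !pvIsAsciiWs c) % 2 == 0)
def Pre_reverse_custom_cipher (hex_data : String) (seed : String) : Prop :=
  pvValidHex hex_data.toList = true
instance (hex_data : String) (seed : String) : Decidable (Pre_reverse_custom_cipher hex_data seed) := by
  unfold Pre_reverse_custom_cipher; infer_instance

def pvWitness_reverse_custom_cipher : String × String := ("4869", "k")

def Spec_reverse_custom_cipher (hex_data : String) (seed : String) (out : String) : Prop :=
  out = reverse_custom_cipher_alt hex_data seed
instance (hex_data : String) (seed : String) (out : String) : Decidable (Spec_reverse_custom_cipher hex_data seed out) := by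
  unfold Spec_reverse_custom_cipher; infer_instance

-- ===== CLAIM (what is proved, stated in full; the proofs are below) =====
def Claim_equal_reverse_custom_cipher : Prop := ∀ (hex_data : String) (seed : String), Dom_reverse_custom_cipher hex_data seed → Pre_reverse_custom_cipher hex_data seed → Spec_reverse_custom_cipher hex_data seed (reverse_custom_cipher hex_data seed)

-- ===== LEMMAS AND PROOFS =====

-- every hex-decoded byte is < 256
theorem pvFromHex?_lt : ∀ (l : List Char) (bs : List Nat), pvFromHex? l = some bs → ∀ b ∈ bs, b < 256 := by
  intro l
  induction l using pvFromHex?.induct with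
  | case1 => intro bs h b hb; simp [pvFromHex?] at h; subst h; simp at hb
  | case2 c rest hws ih =>
      intro bs h b hb
      rw [pvFromHex?.eq_def] at h
      simp only [hws, if_pos] at h
      exact ih bs h b hb
  | case3 c hws =>
      intro bs h
      rw [pvFromHex?.eq_def] at h
      simp [hws] at h
  | case4 c hws c2 rest2 h1 l1 hv2 hv1 ih =>
      intro bs h b hb
      rw [pvFromHex?.eq_def] at h
      simp only [hws, Bool.false_eq_true, if_false, hv1, hv2, Option.map_eq_some_iff] at h
      obtain ⟨bs', hbs', rfl⟩ := h
      rcases List.mem_cons.mp hb with rfl | hmem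
      · have hh : h1 < 16 := by
          simp only [pvHexVal?] at hv1; split_ifs at hv1 <;> simp_all <;> omega
        have hl : l1 < 16 := by
          simp only [pvHexVal?] at hv2; split_ifs at hv2 <;> simp_all <;> omega
        omega
      · exact ih bs' hbs' b hmem
  | case5 c hws c2 rest2 hno =>
      intro bs h
      rw [pvFromHex?.eq_def] at h
      simp only [hws, Bool.false_eq_true, if_false] at h
      simp at h

-- A's seed loop computes the Nat sum of the character codes
theorem pvSeedSum (l : List Char) :
    l.foldl (fun (s : Int) c => s + (c.toNat : Int)) 0 = ((l.map Char.toNat).sum : Nat) := by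
  have key : ∀ (l : List Char) (a : Nat),
      l.foldl (fun (s : Int) c => s + (c.toNat : Int)) (a : Int) = ((a + (l.map Char.toNat).sum : Nat) : Int) := by
    intro l
    induction l with
    | nil => intro a; simp
    | cons c t ih =>
        intro a
        simp only [List.foldl_cons, List.map_cons, List.sum_cons]
        have := ih (a + c.toNat)
        push_cast at this ⊢
        rw [this]; ring
  simpa using key l 0

-- ===== VERDICT (by name: the statement is the Claim_ definition above) =====
theorem reverse_custom_cipher_spec : Claim_equal_reverse_custom_cipher := by
  intro hex_data seed _hdom _hpre
  unfold Spec_reverse_custom_cipher reverse_custom_cipher reverse_custom_cipher_alt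
  cases hfh : pvFromHex? hex_data.toList with
  | none => rfl
  | some bs =>
    simp only
    rw [pvSeedSum]
    congr 1
    rw [PySem.List.foldl_append_singleton_eq_map]
    apply List.map_congr_left
    intro b hb
    have hb256 : b < 256 := pvFromHex?_lt _ _ hfh b hb
    rw [PySem.List.getD_map_range _ _ _ _ hb256]
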